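-- pv_equiv track=rewrite | github.com/upesacm/21DaysOfCode-2023 | Python/Saloni_Sukirti/Quiz1/q3.py | check_triplet_exists
-- ===== SOURCE A (Python) =====
-- def check_triplet_exists(a, b, c):
--     if a == 0 or b == 0 or c == 0:
--         return False
--
--
--
--     for x in range(a, a * b + 1):
--         for y in range(b, a * b + 1):
--             for z in range(c, a * b + 1):
--                 if x + y > z:
--                     return True
--
--     return False
-- ===== SOURCE B (Python) =====
-- def check_triplet_exists(a, b, c):
--     if a == 0 or b == 0 or c == 0:
--         return False
--     p = a * b
--     # A triplet exists iff all three ranges [a..p], [b..p], [c..p] are nonempty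
--     # and the largest possible x+y (= 2*p) exceeds the smallest z (= c).
--     return a <= p and b <= p and c <= p and 2 * p > c
-- ===== Notes on version B (the rewrite author's own statement) =====
-- stated objective: simpler
-- what changed: Replaced the triple nested scan over the ranges by a closed-form arithmetic test: all three ranges nonempty and 2*a*b > c.
import Mathlib
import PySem

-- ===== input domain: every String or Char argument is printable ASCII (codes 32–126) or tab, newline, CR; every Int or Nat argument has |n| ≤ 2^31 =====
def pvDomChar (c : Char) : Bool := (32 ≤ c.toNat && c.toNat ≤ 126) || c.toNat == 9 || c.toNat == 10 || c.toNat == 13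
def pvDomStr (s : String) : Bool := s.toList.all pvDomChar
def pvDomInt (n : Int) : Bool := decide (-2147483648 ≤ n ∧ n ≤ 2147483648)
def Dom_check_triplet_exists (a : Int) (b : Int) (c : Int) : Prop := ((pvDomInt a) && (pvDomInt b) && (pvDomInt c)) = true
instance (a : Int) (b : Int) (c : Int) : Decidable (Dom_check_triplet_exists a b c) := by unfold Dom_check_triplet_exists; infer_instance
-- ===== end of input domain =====

-- B replaces A's triple nested range scan by a closed-form arithmetic test (objective: simpler).

-- ===== PORT A =====
-- inner loop: for z in range(c, hi+1): if x + y > z: return True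
def pyLoopZ (hi x y z : Int) : Bool :=
  if _h : z ≤ hi then (if x + y > z then true else pyLoopZ hi x y (z + 1)) else false
termination_by (hi + 1 - z).toNat
decreasing_by omega

-- middle loop: for y in range(b, hi+1): <z-loop>
def pyLoopY (hi c x y : Int) : Bool :=
  if _h : y ≤ hi then (if pyLoopZ hi x y c then true else pyLoopY hi c x (y + 1)) else false
termination_by (hi + 1 - y).toNat
decreasing_by omega

-- outer loop: for x in range(a, hi+1): <y-loop>
def pyLoopX (hi b c x : Int) : Bool :=
  if _h : x ≤ hi then (if pyLoopY hi c x b then true else pyLoopX hi b c (x + 1)) else false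
termination_by (hi + 1 - x).toNat
decreasing_by omega

def check_triplet_exists (a : Int) (b : Int) (c : Int) : Bool :=
  if a == 0 || b == 0 || c == 0 then false
  else pyLoopX (a * b) b c a

-- ===== PORT B =====
def check_triplet_exists_alt (a : Int) (b : Int) (c : Int) : Bool :=
  if a == 0 || b == 0 || c == 0 then false
  else
    let p := a * b
    decide (a ≤ p) && decide (b ≤ p) && decide (c ≤ p) && decide (2 * p > c)

-- ===== PRECONDITION & SPEC =====
def Spec_check_triplet_exists (a : Int) (b : Int) (c : Int) (out : Bool) : Prop := out = check_triplet_exists_alt a b c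
instance (a : Int) (b : Int) (c : Int) (out : Bool) : Decidable (Spec_check_triplet_exists a b c out) := by unfold Spec_check_triplet_exists; infer_instance

-- ===== CLAIM (what is proved, stated in full; the proofs are below) =====
def Claim_equal_check_triplet_exists : Prop := ∀ (a : Int) (b : Int) (c : Int), Dom_check_triplet_exists a b c → Spec_check_triplet_exists a b c (check_triplet_exists a b c)

-- ===== LEMMAS AND PROOFS =====

lemma pyLoopZ_eq (hi x y z : Int) : pyLoopZ hi x y z = decide (z ≤ hi ∧ z < x + y) := by
  induction z using pyLoopZ.induct hi x y with
  | case1 z h hgt =>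
      rw [pyLoopZ, dif_pos h, if_pos hgt]; simp; omega
  | case2 z h hgt ih =>
      rw [pyLoopZ, dif_pos h, if_neg hgt, ih]
      simp only [decide_eq_decide]; omega
  | case3 z h =>
      rw [pyLoopZ, dif_neg h]; simp; omega

lemma pyLoopY_eq (hi c x y : Int) : pyLoopY hi c x y = decide (y ≤ hi ∧ c ≤ hi ∧ c < x + hi) := by
  induction y using pyLoopY.induct hi c x with
  | case1 y h hz =>
      rw [pyLoopY, dif_pos h, if_pos hz]
      rw [pyLoopZ_eq] at hz; simp at hz
      simp; omega
  | case2 y h hz ih =>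
      rw [pyLoopY, dif_pos h, if_neg hz, ih]
      rw [pyLoopZ_eq] at hz; simp at hz
      simp only [decide_eq_decide]; omega
  | case3 y h =>
      rw [pyLoopY, dif_neg h]; simp; omega

lemma pyLoopX_eq (hi b c x : Int) : pyLoopX hi b c x = decide (x ≤ hi ∧ b ≤ hi ∧ c ≤ hi ∧ c < hi + hi) := by
  induction x using pyLoopX.induct hi b c with
  | case1 x h hy =>
      rw [pyLoopX, dif_pos h, if_pos hy]
      rw [pyLoopY_eq] at hy; simp at hy
      simp; omega
  | case2 x h hy ih =>
      rw [pyLoopX, dif_pos h, if_neg hy, ih]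
      rw [pyLoopY_eq] at hy; simp at hy
      simp only [decide_eq_decide]; omega
  | case3 x h =>
      rw [pyLoopX, dif_neg h]; simp; omega

-- ===== VERDICT (by name: the statement is the Claim_ definition above) =====
theorem check_triplet_exists_spec : Claim_equal_check_triplet_exists := by
  intro a b c _
  unfold Spec_check_triplet_exists check_triplet_exists check_triplet_exists_alt
  by_cases h : a == 0 || b == 0 || c == 0
  · simp [h]
  · simp only [h, if_false, Bool.false_eq_true]
    rw [pyLoopX_eq]
    generalize a * b = p
    have h2 : 2 * p > c ↔ c < p + p := by omega
    simp [Bool.decide_and, h2, Bool.and_assoc]
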